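-- pv_equiv track=rewrite | github.com/FebrinaSinaga/Kriptografi | prak8/latihanpraktek8gabunganAES.py | mix_columns_state
-- ===== SOURCE A (Python) =====
-- def hex_list_str(lst):
--     return " ".join(f"{b:02X}" for b in lst)
--
-- def xtime(a):
--     return ((a << 1) & 0xFF) ^ (0x1B if (a & 0x80) else 0x00)
--
-- def mul(a, b):
--     if b == 1:
--         return a
--     if b == 2:
--         return xtime(a)
--     if b == 3:
--         return xtime(a) ^ a
--     # fallback generic
--     res = 0
--     temp = a
--     for i in range(8):
--         if (b >> i) & 1:
--             res ^= temp
--         temp = xtime(temp)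
--     return res & 0xFF
--
-- def mix_single_column(col):
--     a = col[:]
--     res = [
--         mul(a[0],2) ^ mul(a[1],3) ^ mul(a[2],1) ^ mul(a[3],1),
--         mul(a[0],1) ^ mul(a[1],2) ^ mul(a[2],3) ^ mul(a[3],1),
--         mul(a[0],1) ^ mul(a[1],1) ^ mul(a[2],2) ^ mul(a[3],3),
--         mul(a[0],3) ^ mul(a[1],1) ^ mul(a[2],1) ^ mul(a[3],2),
--     ]
--     return [r & 0xFF for r in res]
--
-- def mix_columns_state(state, log_output=None):
--     new = []
--     if log_output is not None:
--         log_output.append("MixColumns:")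
--     for c in range(4):
--         before = state[c]
--         after = mix_single_column(before)
--         new.append(after)
--         if log_output is not None:
--             log_output.append(f" Col {c}: {hex_list_str(before)} -> {hex_list_str(after)}")
--     if log_output is not None:
--         log_output.append("")
--     return new
-- ===== SOURCE B (Python) =====
-- def xtime(a):
--     return ((a << 1) & 0xFF) ^ (0x1B if (a & 0x80) else 0x00)
--
-- def hex_list_str(lst):
--     return " ".join(f"{b:02X}" for b in lst)
--
-- def _mix4(col):
--     a, b, c, d = col[0], col[1], col[2], col[3]
--     t = a ^ b ^ c ^ d
--     return [(a ^ t ^ xtime(a ^ b)) & 0xFF,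
--             (b ^ t ^ xtime(b ^ c)) & 0xFF,
--             (c ^ t ^ xtime(c ^ d)) & 0xFF,
--             (d ^ t ^ xtime(d ^ a)) & 0xFF]
--
-- def mix_columns_state(state, log_output=None):
--     new = [_mix4(state[c]) for c in range(4)]
--     if log_output is not None:
--         log_output.append("MixColumns:")
--         for c in range(4):
--             log_output.append(f" Col {c}: {hex_list_str(state[c])} -> {hex_list_str(new[c])}")
--         log_output.append("")
--     return new
-- ===== Notes on version B (the rewrite author's own statement) =====
-- stated objective: alternative
-- what changed: Replaces the GF(2^8) matrix dot-product helper mul() (16 multiplications per state) by the standard MixColumns xtime identity: per column compute the shared XOR t = a^b^c^d and four pairwise xtime terms, dropping mul() entirely; logging and return value are unchanged.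
import Mathlib
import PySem

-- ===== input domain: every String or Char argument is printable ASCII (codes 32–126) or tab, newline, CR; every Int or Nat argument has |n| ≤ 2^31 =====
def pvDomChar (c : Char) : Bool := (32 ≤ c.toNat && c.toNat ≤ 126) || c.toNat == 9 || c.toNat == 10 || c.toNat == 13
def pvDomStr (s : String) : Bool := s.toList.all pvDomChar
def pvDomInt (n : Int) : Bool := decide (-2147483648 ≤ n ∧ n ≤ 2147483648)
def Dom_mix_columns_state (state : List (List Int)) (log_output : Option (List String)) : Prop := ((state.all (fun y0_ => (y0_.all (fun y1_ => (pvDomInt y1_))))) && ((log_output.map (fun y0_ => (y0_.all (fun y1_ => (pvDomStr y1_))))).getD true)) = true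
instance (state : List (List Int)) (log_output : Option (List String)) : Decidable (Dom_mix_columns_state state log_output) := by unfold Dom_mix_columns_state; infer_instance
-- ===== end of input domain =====

-- B replaces the MixColumns dot-product helper mul() by the xtime identity (shared XOR term t plus
-- pairwise xtimes); same return value, same log lines.  Note: A and B both MUTATE log_output in place
-- (identical appends); the equivalence proved here is about the RETURN value.

-- ===== PORT A =====
-- hex_list_str and the log_output.append calls only affect the mutated log, never the return
-- value, so they are omitted from the port (mutation is not representable in the return type).

def pvXtime (a : Int) : Int :=
  PySem.Int.bxor (PySem.Int.band (a <<< (1:Nat)) 255)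
    (if PySem.Int.band a 128 ≠ 0 then 27 else 0)

def pvMul (a b : Int) : Int :=
  if b = 1 then a
  else if b = 2 then pvXtime a
  else if b = 3 then PySem.Int.bxor (pvXtime a) a
  else
    PySem.Int.band
      (((List.range 8).foldl (fun (st : Int × Int) i =>
        (if PySem.Int.band (b >>> i) 1 ≠ 0 then PySem.Int.bxor st.1 st.2 else st.1,
         pvXtime st.2)) (0, a)).1) 255

-- Python: a = col[:] copies the list and then only reads a[0..3]; ported as direct reads.
-- col[i] raises IndexError for columns shorter than 4 — excluded by Pre_ (pyGetD default 0 there).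
def pvMixSingleColumn (col : List Int) : List Int :=
  let a0 := PySem.List.pyGetD col 0 0
  let a1 := PySem.List.pyGetD col 1 0
  let a2 := PySem.List.pyGetD col 2 0
  let a3 := PySem.List.pyGetD col 3 0
  ([PySem.Int.bxor (PySem.Int.bxor (PySem.Int.bxor (pvMul a0 2) (pvMul a1 3)) (pvMul a2 1)) (pvMul a3 1),
    PySem.Int.bxor (PySem.Int.bxor (PySem.Int.bxor (pvMul a0 1) (pvMul a1 2)) (pvMul a2 3)) (pvMul a3 1),
    PySem.Int.bxor (PySem.Int.bxor (PySem.Int.bxor (pvMul a0 1) (pvMul a1 1)) (pvMul a2 2)) (pvMul a3 3),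
    PySem.Int.bxor (PySem.Int.bxor (PySem.Int.bxor (pvMul a0 3) (pvMul a1 1)) (pvMul a2 1)) (pvMul a3 2)
   ]).map (fun r => PySem.Int.band r 255)

-- for c in range(4): new.append(mix_single_column(state[c])); state[c] raises IndexError for
-- len(state) < 4 — excluded by Pre_ (pyGetD default [] there).
def mix_columns_state (state : List (List Int)) (log_output : Option (List String)) : List (List Int) :=
  (PySem.List.pyRange 0 4 1).foldl
    (fun new c => new ++ [pvMixSingleColumn (PySem.List.pyGetD state c [])]) []

-- ===== PORT B =====
-- Source B's xtime is byte-for-byte A's xtime, so its port reuses pvXtime.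
def pvMix4 (col : List Int) : List Int :=
  let a := PySem.List.pyGetD col 0 0
  let b := PySem.List.pyGetD col 1 0
  let c := PySem.List.pyGetD col 2 0
  let d := PySem.List.pyGetD col 3 0
  let t := PySem.Int.bxor (PySem.Int.bxor (PySem.Int.bxor a b) c) d
  [PySem.Int.band (PySem.Int.bxor (PySem.Int.bxor a t) (pvXtime (PySem.Int.bxor a b))) 255,
   PySem.Int.band (PySem.Int.bxor (PySem.Int.bxor b t) (pvXtime (PySem.Int.bxor b c))) 255,
   PySem.Int.band (PySem.Int.bxor (PySem.Int.bxor c t) (pvXtime (PySem.Int.bxor c d))) 255,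
   PySem.Int.band (PySem.Int.bxor (PySem.Int.bxor d t) (pvXtime (PySem.Int.bxor d a))) 255]

-- B: new = [_mix4(state[c]) for c in range(4)]; the logging loop does not affect the return value.
def mix_columns_state_alt (state : List (List Int)) (log_output : Option (List String)) : List (List Int) :=
  (PySem.List.pyRange 0 4 1).map (fun c => pvMix4 (PySem.List.pyGetD state c []))

-- ===== PRECONDITION & SPEC =====
-- Pre_ excludes exactly the inputs where Python A raises IndexError: it reads state[0..3] and
-- the first four entries of each of those columns.
def Pre_mix_columns_state (state : List (List Int)) (log_output : Option (List String)) : Prop :=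
  4 ≤ state.length ∧ ∀ col ∈ state.take 4, 4 ≤ col.length
instance (state : List (List Int)) (log_output : Option (List String)) : Decidable (Pre_mix_columns_state state log_output) := by unfold Pre_mix_columns_state; infer_instance

def pvWitness_mix_columns_state : List (List Int) × Option (List String) :=
  ([[1, 2, 3, 4], [5, 6, 7, 8], [9, 10, 11, 12], [208, 250, 130, 255]], none)

def Spec_mix_columns_state (state : List (List Int)) (log_output : Option (List String)) (out : List (List Int)) : Prop := out = mix_columns_state_alt state log_output
instance (state : List (List Int)) (log_output : Option (List String)) (out : List (List Int)) : Decidable (Spec_mix_columns_state state log_output out) := by unfold Spec_mix_columns_state; infer_instance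

-- ===== CLAIM (what is proved, stated in full; the proofs are below) =====
def Claim_equal_mix_columns_state : Prop := ∀ (state : List (List Int)) (log_output : Option (List String)), Dom_mix_columns_state state log_output → Pre_mix_columns_state state log_output → Spec_mix_columns_state state log_output (mix_columns_state state log_output)

-- ===== LEMMAS AND PROOFS =====

theorem pv_bxor_eq (a b : Int) : PySem.Int.bxor a b = a.xor b := by
  rcases a with m | m <;> rcases b with n | n <;>
    simp [PySem.Int.bxor, Int.xor, Int.negSucc_eq] <;> omega

theorem pv_sub_and (n m : Nat) : n - (n &&& m) = n.ldiff m := by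
  induction n using Nat.strong_induction_on generalizing m with
  | _ n ih =>
    rcases Nat.eq_zero_or_pos n with h | h
    · subst h; simp [Nat.ldiff, Nat.bitwise_zero_left]
    · have hand : (n &&& m) / 2 = (n/2) &&& (m/2) := by
        have := @Nat.bitwise_div_two_pow (fun a b => a && b) n m 1 (by simp)
        simpa [HAnd.hAnd, AndOp.and, Nat.land] using this
      have hldiv : (n.ldiff m) / 2 = (n/2).ldiff (m/2) := by
        have := @Nat.bitwise_div_two_pow (fun a b => a && !b) n m 1 (by simp)
        simpa [Nat.ldiff] using this
      have hmod : (n &&& m) % 2 = (n % 2) &&& (m % 2) := by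
        simpa using @Nat.and_mod_two_pow n m 1
      have hlmod : (n.ldiff m) % 2 = (n % 2).ldiff (m % 2) := by
        have := @Nat.bitwise_mod_two_pow (fun a b => a && !b) n m 1 (by simp)
        simpa [Nat.ldiff] using this
      have hle : (n/2) &&& (m/2) ≤ n/2 := Nat.and_le_left
      have ih2 := ih (n/2) (by omega) (m/2)
      have hx : n % 2 = 0 ∨ n % 2 = 1 := by omega
      have hy : m % 2 = 0 ∨ m % 2 = 1 := by omega
      have e1 : n &&& m = 2 * ((n/2) &&& (m/2)) + ((n % 2) &&& (m % 2)) := by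
        omega
      have e2 : n.ldiff m = 2 * ((n/2).ldiff (m/2)) + ((n % 2).ldiff (m % 2)) := by
        omega
      have b1 : ((n % 2) &&& (m % 2)) ≤ n % 2 := Nat.and_le_left
      have b2 : ((n % 2).ldiff (m % 2)) = (n % 2) - ((n % 2) &&& (m % 2)) := by
        rcases hx with hx | hx <;> rcases hy with hy | hy <;> rw [hx, hy] <;>
          (apply Nat.eq_of_testBit_eq; intro i; simp [Nat.testBit_ldiff])
      omega

theorem pv_band_eq (a b : Int) : PySem.Int.band a b = a.land b := by
  rcases a with m | m <;> rcases b with n | n <;>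
    simp [PySem.Int.band, Int.land, Int.negSucc_eq, pv_sub_and] <;> omega

theorem pv_int_ext {a b : Int} (h : ∀ i, a.testBit i = b.testBit i) : a = b := by
  rcases a with m | m <;> rcases b with n | n
  · exact congrArg Int.ofNat (Nat.eq_of_testBit_eq fun i => by simpa [Int.testBit] using h i)
  · exfalso
    have hm : m.testBit (m+n) = false :=
      Nat.testBit_lt_two_pow (lt_of_lt_of_le Nat.lt_two_pow_self
        (Nat.pow_le_pow_right (by norm_num) (by omega)))
    have hn : n.testBit (m+n) = false :=
      Nat.testBit_lt_two_pow (lt_of_lt_of_le Nat.lt_two_pow_self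
        (Nat.pow_le_pow_right (by norm_num) (by omega)))
    have := h (m + n)
    simp [Int.testBit, hm, hn] at this
  · exfalso
    have hm : m.testBit (m+n) = false :=
      Nat.testBit_lt_two_pow (lt_of_lt_of_le Nat.lt_two_pow_self
        (Nat.pow_le_pow_right (by norm_num) (by omega)))
    have hn : n.testBit (m+n) = false :=
      Nat.testBit_lt_two_pow (lt_of_lt_of_le Nat.lt_two_pow_self
        (Nat.pow_le_pow_right (by norm_num) (by omega)))
    have := h (m + n)
    simp [Int.testBit, hm, hn] at this
  · have : m = n := Nat.eq_of_testBit_eq fun i => by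
      have := h i; simp [Int.testBit] at this; exact this
    rw [this]

theorem pv_shl1_ofNat (m : Nat) : (Int.ofNat m) <<< (1:Nat) = Int.ofNat (m <<< 1) :=
  (Int.natCast_shiftLeft m 1).symm

theorem pv_shl1_negSucc (m : Nat) : (Int.negSucc m) <<< (1:Nat) = Int.negSucc (2*m+1) := by
  show Int.negSucc ((m+1) <<< 1 - 1) = Int.negSucc (2*m+1)
  have h : (m+1) <<< 1 - 1 = 2*m+1 := by rw [Nat.shiftLeft_eq]; omega
  rw [h]

theorem pv_bit_odd (m : Nat) (i : Nat) : (2*m+1).testBit i = if i = 0 then true else m.testBit (i-1) := by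
  rcases Nat.eq_zero_or_pos i with h | h
  · subst h; simp [Nat.testBit_zero]; try omega
  · obtain ⟨j, rfl⟩ : ∃ j, i = j + 1 := ⟨i - 1, by omega⟩
    simp [Nat.testBit_succ]
    congr 1
    omega

theorem pv_testBit_shl1 (a : Int) (i : Nat) :
    (a <<< (1:Nat)).testBit i = if i = 0 then false else a.testBit (i-1) := by
  rcases a with m | m
  · rw [pv_shl1_ofNat]
    simp [Int.testBit, Nat.testBit_shiftLeft]
    by_cases h : i = 0
    · simp [h]
    · simp [h, Nat.one_le_iff_ne_zero]
  · rw [pv_shl1_negSucc]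
    by_cases h : i = 0 <;> simp [Int.testBit, pv_bit_odd, h]

theorem pv_testBit_255 (i : Nat) : (255:Int).testBit i = decide (i < 8) := by
  show (Int.ofNat 255).testBit i = decide (i < 8)
  rw [show (Int.ofNat 255).testBit i = Nat.testBit 255 i from rfl]
  rw [show (255:Nat) = 2^8 - 1 from by norm_num, Nat.testBit_two_pow_sub_one]

theorem pv_testBit_128 (i : Nat) : (128:Int).testBit i = decide (7 = i) := by
  show (Int.ofNat 128).testBit i = decide (7 = i)
  rw [show (Int.ofNat 128).testBit i = Nat.testBit 128 i from rfl]
  rw [show (128:Nat) = 2^7 from by norm_num, Nat.testBit_two_pow]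

theorem pv_band128 (x : Int) :
    PySem.Int.band x 128 = if x.testBit 7 then 128 else 0 := by
  rw [pv_band_eq]
  by_cases h : x.testBit 7 = true
  · simp only [h, if_true]
    apply pv_int_ext; intro i
    rw [Int.testBit_land]
    by_cases hi : 7 = i
    · subst hi; simp [h, pv_testBit_128]
    · simp [pv_testBit_128, hi]
  · rw [Bool.not_eq_true] at h
    simp only [h, Bool.false_eq_true, if_false]
    apply pv_int_ext; intro i
    rw [Int.testBit_land]
    by_cases hi : 7 = i
    · subst hi
      rw [h, Bool.false_and]
      simp [Int.testBit]
    · have h128 : (128:Int).testBit i = false := by rw [pv_testBit_128]; simp [hi]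
      rw [h128, Bool.and_false]
      simp [Int.testBit]

theorem pv_cond (x : Int) : (PySem.Int.band x 128 ≠ 0) ↔ (x.testBit 7 = true) := by
  rw [pv_band128]
  by_cases h : x.testBit 7 = true <;> simp [h]

theorem pv_xtime_linear (a b : Int) :
    pvXtime (PySem.Int.bxor a b) = PySem.Int.bxor (pvXtime a) (pvXtime b) := by
  unfold pvXtime
  have h7 : (PySem.Int.bxor a b).testBit 7 = ((a.testBit 7) ^^ (b.testBit 7)) := by
    rw [pv_bxor_eq]; exact Int.testBit_lxor a b 7
  by_cases ha : a.testBit 7 = true <;> by_cases hb : b.testBit 7 = true <;>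
    simp only [pv_cond, h7, ha, hb, Bool.xor_false, Bool.xor_true, Bool.true_xor,
      Bool.false_xor, Bool.not_true, Bool.not_false, Bool.false_eq_true,
      Bool.true_eq_false, if_true, if_false, ite_true, ite_false] <;>
    simp only [pv_bxor_eq, pv_band_eq] <;>
    (apply pv_int_ext; intro i;
     simp only [Int.testBit_lxor, Int.testBit_land, pv_testBit_shl1, pv_testBit_255];
     by_cases hi : i = 0 <;>
     cases hx : a.testBit (i-1) <;> cases hy : b.testBit (i-1) <;>
     cases hz : (27:Int).testBit i <;> cases hm : decide (i < 8) <;>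
     simp [hi, hx, hy, hz, hm, Int.testBit])

theorem pvMul_one (a : Int) : pvMul a 1 = a := by simp [pvMul]
theorem pvMul_two (a : Int) : pvMul a 2 = pvXtime a := by norm_num [pvMul]
theorem pvMul_three (a : Int) : pvMul a 3 = PySem.Int.bxor (pvXtime a) a := by norm_num [pvMul]

theorem pv_col (col : List Int) : pvMixSingleColumn col = pvMix4 col := by
  unfold pvMixSingleColumn pvMix4
  simp only [pvMul_one, pvMul_two, pvMul_three, List.map]
  refine congrArg₂ _ (congrArg (fun r => PySem.Int.band r 255) ?_) (congrArg₂ _ (congrArg (fun r => PySem.Int.band r 255) ?_) (congrArg₂ _ (congrArg (fun r => PySem.Int.band r 255) ?_) (congrArg₂ _ (congrArg (fun r => PySem.Int.band r 255) ?_) rfl))) <;>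
  · rw [pv_xtime_linear]
    simp only [pv_bxor_eq]
    apply pv_int_ext; intro i
    simp [Int.testBit_lxor, Bool.xor_assoc, Bool.xor_comm, Bool.xor_left_comm]

-- ===== VERDICT (by name: the statement is the Claim_ definition above) =====
theorem mix_columns_state_spec : Claim_equal_mix_columns_state := by
  intro state log _ _
  unfold Spec_mix_columns_state mix_columns_state mix_columns_state_alt
  have hr : PySem.List.pyRange 0 4 1 = [0, 1, 2, 3] := by decide
  rw [hr]
  simp [List.foldl, List.map, pv_col]
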